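-- pv_equiv track=rewrite | github.com/yasin0205/Shot-Boundary-Detection | 03_grid_search_parameter_histogram_detector.py | calculate_results_with_margin
-- ===== SOURCE A (Python) =====
-- def calculate_results_with_margin(detected_frames_set, ground_truth_frames, margin):
--     """Calculate TP, FP, FN, and the FP/FN frames with a specified margin."""
--     true_positives = 0
--     matched_detected_frames = set()
--     false_positives_frames = set(detected_frames_set)
--     false_negatives_frames = set(ground_truth_frames)
--
--     ground_truth_frames = sorted(ground_truth_frames)
--     detected_frames_set = sorted(detected_frames_set)
--
--     for gt_frame in ground_truth_frames:
--         for detected_frame in detected_frames_set: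
--             if detected_frame not in matched_detected_frames and abs(detected_frame - gt_frame) <= margin:
--                 true_positives += 1
--                 matched_detected_frames.add(detected_frame)
--                 false_positives_frames.discard(detected_frame)
--                 false_negatives_frames.discard(gt_frame)
--                 break
--
--     false_positives = len(false_positives_frames)
--     false_negatives = len(false_negatives_frames)
--
--     return true_positives, false_positives, false_negatives, sorted(false_positives_frames), sorted(
--         false_negatives_frames)
-- ===== SOURCE B (Python) =====
-- def calculate_results_with_margin(detected_frames_set, ground_truth_frames, margin):
--     """Calculate TP, FP, FN, and the FP/FN frames with a specified margin.
--
--     Sorted two-pointer greedy: each ground-truth frame (ascending) takes the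
--     smallest still-unmatched detected frame within the margin; detected frames
--     that fall below the moving window can never match later and become FP."""
--     det = sorted(set(detected_frames_set))
--     fp_frames = []
--     matched_gt = set()
--     tp = 0
--     j = 0
--     for gt in sorted(ground_truth_frames):
--         while j < len(det) and det[j] < gt - margin:
--             fp_frames.append(det[j])
--             j += 1
--         if j < len(det) and det[j] <= gt + margin:
--             tp += 1
--             matched_gt.add(gt)
--             j += 1
--     fp_frames.extend(det[j:])
--     fn_frames = [g for g in sorted(set(ground_truth_frames)) if g not in matched_gt]
--     return tp, len(fp_frames), len(fn_frames), fp_frames, fn_frames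
-- ===== Notes on version B (the rewrite author's own statement) =====
-- stated objective: faster
-- what changed: Replaces the nested scan (for each ground-truth frame, rescan the whole sorted detected list for the first unmatched frame within the margin) by a single two-pointer sweep over both sorted lists: detected frames below the moving window are emitted as FP once and never revisited, so matching is one pass after sorting.
import Mathlib
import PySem

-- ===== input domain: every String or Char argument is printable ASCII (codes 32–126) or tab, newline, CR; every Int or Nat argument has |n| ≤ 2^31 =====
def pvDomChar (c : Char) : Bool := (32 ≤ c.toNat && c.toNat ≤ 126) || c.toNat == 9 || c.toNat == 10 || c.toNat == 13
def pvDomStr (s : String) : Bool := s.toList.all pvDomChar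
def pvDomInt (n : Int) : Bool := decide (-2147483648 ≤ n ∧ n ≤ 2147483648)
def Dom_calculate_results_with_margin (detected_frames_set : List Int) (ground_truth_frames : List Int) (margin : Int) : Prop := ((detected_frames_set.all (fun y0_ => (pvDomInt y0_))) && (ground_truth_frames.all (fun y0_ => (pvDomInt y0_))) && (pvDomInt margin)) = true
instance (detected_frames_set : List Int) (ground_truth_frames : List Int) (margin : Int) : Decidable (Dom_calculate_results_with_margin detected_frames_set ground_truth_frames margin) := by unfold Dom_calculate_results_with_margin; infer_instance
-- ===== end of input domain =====

-- B replaces A's nested rescans by one two-pointer sweep over the two sorted lists (same results).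

-- ===== PORT A =====
-- inner 'for detected_frame in detected_frames_set: … break' — first unmatched detected frame within the margin
def pvAFind (matched : PySem.Set Int) (g m : Int) : List Int → Option Int
  | [] => none
  | d :: ds =>
    if !(PySem.Set.contains matched d) && decide (|d - g| ≤ m) then some d
    else pvAFind matched g m ds

-- outer 'for gt_frame in ground_truth_frames' loop; state (tp, matched, fpSet, fnSet)
def pvALoop (m : Int) (dets : List Int) :
    List Int → Int × PySem.Set Int × PySem.Set Int × PySem.Set Int →
    Int × PySem.Set Int × PySem.Set Int × PySem.Set Int
  | [], st => st
  | g :: gs, (tp, matched, fpS, fnS) =>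
    match pvAFind matched g m dets with
    | none => pvALoop m dets gs (tp, matched, fpS, fnS)
    | some d =>
        pvALoop m dets gs
          (tp + 1, PySem.Set.add matched d, PySem.Set.discard fpS d, PySem.Set.discard fnS g)

def calculate_results_with_margin (detected_frames_set : List Int) (ground_truth_frames : List Int) (margin : Int) : Int × Int × Int × List Int × List Int :=
  let fpS0 : PySem.Set Int := PySem.Set.ofList detected_frames_set
  let fnS0 : PySem.Set Int := PySem.Set.ofList ground_truth_frames
  let gts := PySem.List.sorted ground_truth_frames (fun x => x)
  let dets := PySem.List.sorted detected_frames_set (fun x => x)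
  let st := pvALoop margin dets gts (0, PySem.Set.empty, fpS0, fnS0)
  (st.1, PySem.Set.len st.2.2.1, PySem.Set.len st.2.2.2,
   PySem.List.sorted st.2.2.1 (fun x => x), PySem.List.sorted st.2.2.2 (fun x => x))

-- ===== PORT B =====
-- the inner 'while j < len(det) and det[j] < gt - margin' loop: (frames skipped to FP, rest)
def pvBSkip (g m : Int) : List Int → List Int × List Int
  | [] => ([], [])
  | d :: ds =>
    if d < g - m then
      let p := pvBSkip g m ds
      (d :: p.1, p.2)
    else ([], d :: ds)

-- 'for gt in sorted(ground_truth_frames)' with state (tp, fp_frames, matched_gt); det consumed from the front (pointer j)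
def pvBLoop (m : Int) :
    List Int → List Int → Int × List Int × PySem.Set Int → Int × List Int × PySem.Set Int
  | [], det, st => (st.1, st.2.1 ++ det, st.2.2)
  | g :: gs, det, (tp, fp, mg) =>
    let s := pvBSkip g m det
    match s.2 with
    | [] => pvBLoop m gs [] (tp, fp ++ s.1, mg)
    | d :: ds =>
      if d ≤ g + m then pvBLoop m gs ds (tp + 1, fp ++ s.1, PySem.Set.add mg g)
      else pvBLoop m gs (d :: ds) (tp, fp ++ s.1, mg)

def calculate_results_with_margin_alt (detected_frames_set : List Int) (ground_truth_frames : List Int) (margin : Int) : Int × Int × Int × List Int × List Int :=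
  let det := PySem.List.sorted (PySem.Set.ofList detected_frames_set) (fun x => x)
  let r := pvBLoop margin (PySem.List.sorted ground_truth_frames (fun x => x)) det (0, [], PySem.Set.empty)
  let fn := (PySem.List.sorted (PySem.Set.ofList ground_truth_frames) (fun x => x)).filter
              (fun g => !(PySem.Set.contains r.2.2 g))
  (r.1, (r.2.1.length : Int), (fn.length : Int), r.2.1, fn)

-- ===== PRECONDITION & SPEC =====
def Spec_calculate_results_with_margin (detected_frames_set : List Int) (ground_truth_frames : List Int) (margin : Int) (out : Int × Int × Int × List Int × List Int) : Prop := out = calculate_results_with_margin_alt detected_frames_set ground_truth_frames margin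
instance (detected_frames_set : List Int) (ground_truth_frames : List Int) (margin : Int) (out : Int × Int × Int × List Int × List Int) : Decidable (Spec_calculate_results_with_margin detected_frames_set ground_truth_frames margin out) := by unfold Spec_calculate_results_with_margin; infer_instance

-- ===== CLAIM (what is proved, stated in full; the proofs are below) =====
def Claim_equal_calculate_results_with_margin : Prop := ∀ (detected_frames_set : List Int) (ground_truth_frames : List Int) (margin : Int), Dom_calculate_results_with_margin detected_frames_set ground_truth_frames margin → Spec_calculate_results_with_margin detected_frames_set ground_truth_frames margin (calculate_results_with_margin detected_frames_set ground_truth_frames margin)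

-- ===== LEMMAS AND PROOFS =====

-- A's inner loop is find-first
theorem pvAFind_eq_find? (M : PySem.Set Int) (g m : Int) (l : List Int) :
    pvAFind M g m l = l.find? (fun d => !(PySem.Set.contains M d) && decide (|d - g| ≤ m)) := by
  induction l with
  | nil => rfl
  | cons d ds ih =>
    cases hb : (!(PySem.Set.contains M d) && decide (|d - g| ≤ m)) <;>
      simp only [pvAFind, List.find?, ih, hb] <;> simp

-- in a ≤-sorted list the first satisfier is ≤ every satisfier
theorem pvFind?_min {p : Int → Bool} {l : List Int} {x : Int}
    (hs : l.Pairwise (· ≤ ·)) (hx : l.find? p = some x) :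
    ∀ y ∈ l, p y = true → x ≤ y := by
  induction l with
  | nil => simp at hx
  | cons a t ih =>
    rw [List.find?_cons] at hx
    rcases List.pairwise_cons.mp hs with ⟨ha, ht⟩
    by_cases hpa : p a = true
    · simp [hpa] at hx
      subst hx
      intro y hy _
      rcases List.mem_cons.mp hy with h | h
      · exact le_of_eq h.symm
      · exact ha y h
    · simp [hpa] at hx
      intro y hy hpy
      rcases List.mem_cons.mp hy with h | h
      · subst h; exact absurd hpy hpa
      · exact ih ht hx y h hpy

-- find? agrees on two ≤-sorted lists with the same members
theorem pvFind?_sorted_congr {p : Int → Bool} {l l' : List Int}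
    (hl : l.Pairwise (· ≤ ·)) (hl' : l'.Pairwise (· ≤ ·))
    (hmem : ∀ x, x ∈ l ↔ x ∈ l') : l.find? p = l'.find? p := by
  cases hfl : l.find? p with
  | none =>
    rw [List.find?_eq_none] at hfl
    symm; rw [List.find?_eq_none]
    intro x hx; exact hfl x ((hmem x).mpr hx)
  | some x =>
    cases hfl' : l'.find? p with
    | none =>
      rw [List.find?_eq_none] at hfl'
      exact absurd (List.find?_some hfl) (hfl' x ((hmem x).mp (List.mem_of_find?_eq_some hfl)))
    | some y =>
      have hx := List.mem_of_find?_eq_some hfl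
      have hy := List.mem_of_find?_eq_some hfl'
      have h1 := pvFind?_min hl hfl y ((hmem _).mpr hy) (List.find?_some hfl')
      have h2 := pvFind?_min hl' hfl' x ((hmem _).mp hx) (List.find?_some hfl)
      rw [le_antisymm h1 h2]

-- A's loop only reads the detected list through pvAFind, so any same-membership ≤-sorted list works
theorem pvALoop_congr (m : Int) {D D' : List Int}
    (hD : D.Pairwise (· ≤ ·)) (hD' : D'.Pairwise (· ≤ ·)) (hmem : ∀ x, x ∈ D ↔ x ∈ D') :
    ∀ (gts : List Int) st, pvALoop m D gts st = pvALoop m D' gts st := by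
  intro gts
  induction gts with
  | nil => intro st; rfl
  | cons g gs ih =>
    rintro ⟨tp, M, fpS, fnS⟩
    have : pvAFind M g m D = pvAFind M g m D' := by
      rw [pvAFind_eq_find?, pvAFind_eq_find?]
      exact pvFind?_sorted_congr hD hD' hmem
    simp only [pvALoop, this]
    cases pvAFind M g m D' with
    | none => exact ih _
    | some d => exact ih _

-- B's while loop is span (< g - m)
theorem pvBSkip_eq (g m : Int) (l : List Int) :
    pvBSkip g m l = (l.takeWhile (fun d => decide (d < g - m)), l.dropWhile (fun d => decide (d < g - m))) := by
  induction l with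
  | nil => rfl
  | cons d ds ih =>
    by_cases hb : d < g - m <;> simp [pvBSkip, List.takeWhile, List.dropWhile, hb, ih]

theorem pvContains_add (M : PySem.Set Int) (d y : Int) :
    PySem.Set.contains (PySem.Set.add M d) y = (PySem.Set.contains M y || y == d) := by
  simp only [PySem.Set.add]
  split
  · rename_i h
    by_cases hyd : y = d
    · subst hyd
      rw [Bool.eq_iff_iff]
      simp only [PySem.Set.contains, List.contains_iff_mem, beq_self_eq_true, Bool.or_true] at *
      simp [h]
    · simp [hyd]
  · rw [Bool.eq_iff_iff]
    simp [PySem.Set.contains]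

theorem pvDropWhile_head {p : Int → Bool} :
    ∀ (l : List Int) {d : Int} {ds : List Int}, l.dropWhile p = d :: ds → p d = false := by
  intro l
  induction l with
  | nil => intro d ds h; simp at h
  | cons a t ih =>
    intro d ds h
    rw [List.dropWhile_cons] at h
    by_cases ha : p a = true
    · simp [ha] at h; exact ih h
    · simp [ha] at h; rw [← h.1]; simp [ha]

-- a Set.discard on a filtered set is a filter with the element added to the excluded set
theorem pvDiscard_filter (S : List Int) (M : PySem.Set Int) (d : Int) :
    PySem.Set.discard (S.filter (fun y => !(PySem.Set.contains M y))) d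
      = S.filter (fun y => !(PySem.Set.contains (PySem.Set.add M d) y)) := by
  simp only [PySem.Set.discard, List.filter_filter]
  apply List.filter_congr
  intro x _
  rw [pvContains_add, Bool.not_or, Bool.and_comm]

-- main invariant: A's quadratic loop and B's two-pointer loop walk in lockstep
theorem pvMain (m : Int) (D Dset Gset : List Int) (hD : D.Pairwise (· < ·)) :
    ∀ (gts : List Int) (M MG : PySem.Set Int) (tp : Int) (F R : List Int),
    gts.Pairwise (· ≤ ·) →
    D.filter (fun d => !(PySem.Set.contains M d)) = F ++ R →
    (∀ f ∈ F, ∀ g ∈ gts, f < g - m) →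
    ∃ Mf : PySem.Set Int,
      pvALoop m D gts (tp, M, Dset.filter (fun d => !(PySem.Set.contains M d)),
                        Gset.filter (fun g => !(PySem.Set.contains MG g)))
        = ((pvBLoop m gts R (tp, F, MG)).1, Mf,
           Dset.filter (fun d => !(PySem.Set.contains Mf d)),
           Gset.filter (fun g => !(PySem.Set.contains (pvBLoop m gts R (tp, F, MG)).2.2 g)))
      ∧ D.filter (fun d => !(PySem.Set.contains Mf d)) = (pvBLoop m gts R (tp, F, MG)).2.1 := by
  intro gts
  induction gts with
  | nil =>
    intro M MG tp F R _ hfil _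
    exact ⟨M, by simp [pvALoop, pvBLoop], by simpa [pvBLoop] using hfil⟩
  | cons g gs ih =>
    intro M MG tp F R hsor hfil hF
    obtain ⟨hg, hgs⟩ := List.pairwise_cons.mp hsor
    have hFR : (F ++ R).Pairwise (· < ·) := hfil ▸ (hD.filter _)
    have hsplit : R.takeWhile (fun x => decide (x < g - m)) ++ R.dropWhile (fun x => decide (x < g - m)) = R :=
      List.takeWhile_append_dropWhile
    set sk := R.takeWhile (fun x => decide (x < g - m)) with hskdef
    have hskmem : ∀ x ∈ sk, x < g - m := by
      intro x hx
      have := List.mem_takeWhile_imp hx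
      simpa using this
    -- the find? of A's inner loop, through the unmatched filter
    have hq : pvAFind M g m D
        = List.find? (fun d => decide (|d - g| ≤ m)) (F ++ R) := by
      rw [pvAFind_eq_find?, ← hfil, List.find?_filter]
      congr 1
      funext a
      simp
    have hFnone : List.find? (fun d => decide (|d - g| ≤ m)) F = none := by
      rw [List.find?_eq_none]
      intro x hx
      have hlt := hF x hx g List.mem_cons_self
      simp only [decide_eq_true_eq, abs_le]
      omega
    have hsknone : List.find? (fun d => decide (|d - g| ≤ m)) sk = none := by
      rw [List.find?_eq_none]
      intro x hx
      have hlt := hskmem x hx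
      simp only [decide_eq_true_eq, abs_le]
      omega
    -- one step of B's loop
    have hB : pvBLoop m (g :: gs) R (tp, F, MG)
        = (match R.dropWhile (fun x => decide (x < g - m)) with
           | [] => pvBLoop m gs [] (tp, F ++ sk, MG)
           | d :: ds =>
             if d ≤ g + m then pvBLoop m gs ds (tp + 1, F ++ sk, PySem.Set.add MG g)
             else pvBLoop m gs (d :: ds) (tp, F ++ sk, MG)) := by
      simp only [pvBLoop, pvBSkip_eq, ← hskdef]
    cases hrest : R.dropWhile (fun x => decide (x < g - m)) with
    | nil =>
      -- no detected frame left in range: A finds nothing either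
      have hR : R = sk := by rw [← hsplit, hrest, List.append_nil]
      have hfind : pvAFind M g m D = none := by
        rw [hq, List.find?_append, hFnone, hR, hsknone]
        rfl
      have hF' : ∀ f ∈ F ++ sk, ∀ g' ∈ gs, f < g' - m := by
        intro f hf g' hg'
        have hgle := hg g' hg'
        rcases List.mem_append.mp hf with h | h
        · have := hF f h g' (List.mem_cons_of_mem _ hg'); omega
        · have := hskmem f h; omega
      obtain ⟨Mf, h1, h2⟩ := ih M MG tp (F ++ sk) [] hgs
        (by rw [hfil, hR, List.append_nil]) hF'
      refine ⟨Mf, ?_, ?_⟩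
      · rw [hB, hrest]
        simp only [pvALoop]
        rw [hfind]
        exact h1
      · rw [hB, hrest]; exact h2
    | cons d ds =>
      have hdge : g - m ≤ d := by
        have := pvDropWhile_head R hrest
        simpa using this
      have hRsplit : R = sk ++ d :: ds := by rw [← hsplit, hrest]
      have hpair : (F ++ (sk ++ d :: ds)).Pairwise (· < ·) := hRsplit ▸ hFR
      have hdds : (d :: ds).Pairwise (· < ·) :=
        ((List.pairwise_append.mp ((List.pairwise_append.mp hpair).2.1)).2.1)
      have hF' : ∀ f ∈ F ++ sk, ∀ g' ∈ gs, f < g' - m := by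
        intro f hf g' hg'
        have hgle := hg g' hg'
        rcases List.mem_append.mp hf with h | h
        · have := hF f h g' (List.mem_cons_of_mem _ hg'); omega
        · have := hskmem f h; omega
      by_cases hdle : d ≤ g + m
      · -- match: A picks exactly this d
        have hfind : pvAFind M g m D = some d := by
          rw [hq, List.find?_append, hFnone, hRsplit, List.find?_append, hsknone]
          simp only [Option.none_or, List.find?_cons]
          have : (decide (|d - g| ≤ m)) = true := by simp [abs_le]; omega
          rw [this]
        -- d is nowhere else in the filtered list
        have hnd : d ∉ F ∧ d ∉ sk ∧ d ∉ ds := by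
          have hne : (F ++ (sk ++ d :: ds)).Pairwise (· ≠ ·) :=
            hpair.imp (fun h => ne_of_lt h)
          rw [List.pairwise_append] at hne
          obtain ⟨_, hne2, hne3⟩ := hne
          rw [List.pairwise_append] at hne2
          obtain ⟨_, hne4, hne5⟩ := hne2
          refine ⟨fun h => hne3 d h d (by simp) rfl, fun h => hne5 d h d (by simp) rfl, ?_⟩
          intro h
          exact (List.pairwise_cons.mp hne4).1 d h rfl
        have hfil' : D.filter (fun y => !(PySem.Set.contains (PySem.Set.add M d) y))
            = (F ++ sk) ++ ds := by
          have hcomp : D.filter (fun y => !(PySem.Set.contains (PySem.Set.add M d) y))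
              = (D.filter (fun y => !(PySem.Set.contains M y))).filter (fun y => !(y == d)) := by
            rw [List.filter_filter]
            apply List.filter_congr
            intro x _
            rw [pvContains_add, Bool.not_or, Bool.and_comm]
          rw [hcomp, hfil, hRsplit]
          have hself : ∀ (l : List Int), d ∉ l → l.filter (fun y => !(y == d)) = l := by
            intro l hl
            rw [List.filter_eq_self]
            intro a ha
            simp only [Bool.not_eq_eq_eq_not, Bool.not_true, beq_eq_false_iff_ne]
            intro heq; exact hl (heq ▸ ha)
          simp only [List.filter_append, List.filter_cons, beq_self_eq_true, Bool.not_true]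
          rw [hself F hnd.1, hself sk hnd.2.1, hself ds hnd.2.2]
          simp
        obtain ⟨Mf, h1, h2⟩ := ih (PySem.Set.add M d) (PySem.Set.add MG g) (tp + 1) (F ++ sk) ds hgs hfil' hF'
        refine ⟨Mf, ?_, ?_⟩
        · rw [hB, hrest]
          simp only [pvALoop, hfind]
          rw [if_pos hdle]
          rw [pvDiscard_filter Dset M d, pvDiscard_filter Gset MG g]
          exact h1
        · rw [hB, hrest]
          simp only [if_pos hdle]
          exact h2
      · -- d beyond the window: nothing matches this gt frame
        have hfind : pvAFind M g m D = none := by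
          rw [hq, List.find?_append, hFnone, hRsplit, List.find?_append, hsknone]
          simp only [Option.none_or]
          rw [List.find?_eq_none]
          intro x hx
          simp only [decide_eq_true_eq, abs_le]
          rcases List.mem_cons.mp hx with h | h
          · omega
          · have : d < x := (List.pairwise_cons.mp hdds).1 x h
            omega
        have hfil' : D.filter (fun y => !(PySem.Set.contains M y)) = (F ++ sk) ++ d :: ds := by
          rw [hfil, hRsplit, List.append_assoc]
        obtain ⟨Mf, h1, h2⟩ := ih M MG tp (F ++ sk) (d :: ds) hgs hfil' hF'
        refine ⟨Mf, ?_, ?_⟩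
        · rw [hB, hrest]
          simp only [pvALoop, hfind]
          rw [if_neg hdle]
          exact h1
        · rw [hB, hrest]
          simp only [if_neg hdle]
          exact h2

-- ===== VERDICT (by name: the statement is the Claim_ definition above) =====
theorem calculate_results_with_margin_spec : Claim_equal_calculate_results_with_margin := by
  intro det gt m _
  unfold Spec_calculate_results_with_margin
  unfold calculate_results_with_margin calculate_results_with_margin_alt
  simp only []
  have hD : (PySem.List.sorted (PySem.Set.ofList det) (fun x => x)).Pairwise (· < ·) :=
    PySem.List.sorted_ofList_pairwise_lt det
  have hcong : ∀ st, pvALoop m (PySem.List.sorted det (fun x => x)) (PySem.List.sorted gt (fun x => x)) st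
      = pvALoop m (PySem.List.sorted (PySem.Set.ofList det) (fun x => x)) (PySem.List.sorted gt (fun x => x)) st := by
    intro st
    exact pvALoop_congr m (PySem.List.sorted_pairwise det (fun x => x))
      (hD.imp (fun h => le_of_lt h))
      (by
        intro x
        rw [PySem.List.mem_sorted, PySem.List.mem_sorted, PySem.Set.mem_ofList])
      _ st
  have hinit : ∀ (l : List Int), l.filter (fun d => !(PySem.Set.contains (PySem.Set.empty) d)) = l := by
    intro l
    rw [List.filter_eq_self]
    intro a _
    rfl
  obtain ⟨Mf, hA, hFf⟩ := pvMain m (PySem.List.sorted (PySem.Set.ofList det) (fun x => x))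
      (PySem.Set.ofList det) (PySem.Set.ofList gt) hD
      (PySem.List.sorted gt (fun x => x)) PySem.Set.empty PySem.Set.empty 0 []
      (PySem.List.sorted (PySem.Set.ofList det) (fun x => x))
      (PySem.List.sorted_pairwise gt (fun x => x))
      (by rw [hinit, List.nil_append])
      (by intro f hf; simp at hf)
  rw [hinit, hinit] at hA
  rw [hcong, hA]
  -- now both sides in terms of the B loop's result
  have hpermD : ((PySem.List.sorted (PySem.Set.ofList det) (fun x => x)).filter
      (fun d => !(PySem.Set.contains Mf d))).Perm
      ((PySem.Set.ofList det).filter (fun d => !(PySem.Set.contains Mf d))) :=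
    (PySem.List.sorted_perm (PySem.Set.ofList det) (fun x => x) false).filter _
  have hsortfp : PySem.List.sorted ((PySem.Set.ofList det).filter (fun d => !(PySem.Set.contains Mf d))) (fun x => x)
      = (PySem.List.sorted (PySem.Set.ofList det) (fun x => x)).filter (fun d => !(PySem.Set.contains Mf d)) :=
    PySem.List.sorted_eq_of_perm_of_pairwise_lt _ _ _ hpermD (hD.filter _)
  have hpermG : ((PySem.List.sorted (PySem.Set.ofList gt) (fun x => x)).filter
      (fun g => !(PySem.Set.contains (pvBLoop m (PySem.List.sorted gt (fun x => x)) (PySem.List.sorted (PySem.Set.ofList det) (fun x => x)) (0, [], PySem.Set.empty)).2.2 g))).Perm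
      ((PySem.Set.ofList gt).filter (fun g => !(PySem.Set.contains (pvBLoop m (PySem.List.sorted gt (fun x => x)) (PySem.List.sorted (PySem.Set.ofList det) (fun x => x)) (0, [], PySem.Set.empty)).2.2 g))) :=
    (PySem.List.sorted_perm (PySem.Set.ofList gt) (fun x => x) false).filter _
  have hsortfn : PySem.List.sorted ((PySem.Set.ofList gt).filter (fun g => !(PySem.Set.contains (pvBLoop m (PySem.List.sorted gt (fun x => x)) (PySem.List.sorted (PySem.Set.ofList det) (fun x => x)) (0, [], PySem.Set.empty)).2.2 g))) (fun x => x)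
      = (PySem.List.sorted (PySem.Set.ofList gt) (fun x => x)).filter (fun g => !(PySem.Set.contains (pvBLoop m (PySem.List.sorted gt (fun x => x)) (PySem.List.sorted (PySem.Set.ofList det) (fun x => x)) (0, [], PySem.Set.empty)).2.2 g)) :=
    PySem.List.sorted_eq_of_perm_of_pairwise_lt _ _ _ hpermG
      ((PySem.List.sorted_ofList_pairwise_lt gt).filter _)
  simp only [PySem.Set.len]
  rw [← hFf, hpermD.length_eq, hpermG.length_eq, hsortfp, hsortfn]
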